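-- pv_equiv track=rewrite | github.com/IranTransitionProject/framework | scripts/rotate_session_log.py | find_resolved_indices
-- ===== SOURCE A (Python) =====
-- def find_resolved_indices(entries: list[dict]) -> set[int]:
--     """Return indices of matched Chat IR + Code IC pairs."""
--     resolved = set()
--     for i, entry in enumerate(entries):
--         if entry["is_chat_ir"] and i + 1 < len(entries):
--             if entries[i + 1]["is_code_ic"]:
--                 resolved.add(i)
--                 resolved.add(i + 1)
--     return resolved
-- ===== SOURCE B (Python) =====
-- def find_resolved_indices(entries: list[dict]) -> set[int]:
--     """Return indices of matched Chat IR + Code IC pairs.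
--
--     Index-first construction: collect the chat-IR positions, derive the set of
--     matched code-IC positions (successors of chat positions), then build the
--     result by a membership test over only the chat positions.
--     """
--     chat = [i for i, e in enumerate(entries) if e["is_chat_ir"]]
--     code = {i + 1 for i in chat if i + 1 < len(entries) and entries[i + 1]["is_code_ic"]}
--     resolved = set()
--     for i in chat:
--         if i + 1 in code:
--             resolved.add(i)
--             resolved.add(i + 1)
--     return resolved
-- ===== Notes on version B (the rewrite author's own statement) =====
-- stated objective: alternative
-- what changed: Instead of A's single enumerate scan that tests both flags inside one loop body, B first collects the chat-IR positions, derives the set of matched code-IC positions from them, and then builds the result by a set-membership pass over only the chat positions.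
import Mathlib
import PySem

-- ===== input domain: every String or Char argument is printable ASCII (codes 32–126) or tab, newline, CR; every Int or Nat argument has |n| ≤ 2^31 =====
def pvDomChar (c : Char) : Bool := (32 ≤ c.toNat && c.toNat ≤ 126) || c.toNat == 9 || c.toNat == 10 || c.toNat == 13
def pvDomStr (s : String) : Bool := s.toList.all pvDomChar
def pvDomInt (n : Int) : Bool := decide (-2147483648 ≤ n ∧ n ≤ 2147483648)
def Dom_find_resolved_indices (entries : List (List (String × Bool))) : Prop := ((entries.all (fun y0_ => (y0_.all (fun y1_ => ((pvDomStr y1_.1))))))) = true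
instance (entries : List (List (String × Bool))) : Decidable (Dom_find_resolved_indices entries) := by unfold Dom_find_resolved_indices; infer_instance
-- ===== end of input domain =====

-- B replaces A's adjacent-pair scan with an index-first construction (chat-position list + code-position set); alternative decomposition, same cost.

-- ===== PORT A =====
-- entry["k"] truthiness: first-match lookup on the assoc list, defaulting to false
-- where Python would raise KeyError (those inputs are excluded by Pre_ below).
def find_resolved_indices (entries : List (List (String × Bool))) : List Int :=
  (PySem.List.enumerate entries 0).foldl (fun resolved ie =>
    if ((PySem.Dict.mk ie.2).get? "is_chat_ir").getD false && decide (ie.1 + 1 < (entries.length : Int)) then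
      match PySem.List.pyGet? entries (ie.1 + 1) with
      | some nxt =>
          if ((PySem.Dict.mk nxt).get? "is_code_ic").getD false then
            PySem.Set.add (PySem.Set.add resolved ie.1) (ie.1 + 1)
          else resolved
      | none => resolved
    else resolved) PySem.Set.empty

-- ===== PORT B =====
-- 'entries[i + 1]["is_code_ic"]' is guarded by 'i + 1 < len(entries)', so the
-- '.elim false' branch of pyGet? is unreachable there; same getD false default
-- as port A for the key lookups Pre_ guarantees to succeed.
def find_resolved_indices_alt (entries : List (List (String × Bool))) : List Int :=
  let chat : List Int :=
    ((PySem.List.enumerate entries 0).filter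
      (fun ie => ((PySem.Dict.mk ie.2).get? "is_chat_ir").getD false)).map (·.1)
  let code : PySem.Set Int :=
    PySem.Set.ofList ((chat.filter (fun i =>
      decide (i + 1 < (entries.length : Int)) &&
      (PySem.List.pyGet? entries (i + 1)).elim false
        (fun nxt => ((PySem.Dict.mk nxt).get? "is_code_ic").getD false))).map (· + 1))
  chat.foldl (fun resolved i =>
    if PySem.Set.contains code (i + 1) then
      PySem.Set.add (PySem.Set.add resolved i) (i + 1)
    else resolved) PySem.Set.empty

-- ===== PRECONDITION & SPEC =====
-- Exactly the inputs where Python A returns (no KeyError): every entry has the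
-- "is_chat_ir" key, and whenever an entry's "is_chat_ir" is truthy and a next
-- entry exists, that next entry has the "is_code_ic" key.
def Pre_find_resolved_indices (entries : List (List (String × Bool))) : Prop :=
  (entries.all (fun e => ((PySem.Dict.mk e).get? "is_chat_ir").isSome)) = true ∧
  ((PySem.List.enumerate entries 0).all (fun ie =>
     !(((PySem.Dict.mk ie.2).get? "is_chat_ir").getD false && decide (ie.1 + 1 < (entries.length : Int))) ||
     ((PySem.List.pyGet? entries (ie.1 + 1)).elim false
        (fun nxt => ((PySem.Dict.mk nxt).get? "is_code_ic").isSome)))) = true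
instance (entries : List (List (String × Bool))) : Decidable (Pre_find_resolved_indices entries) := by unfold Pre_find_resolved_indices; infer_instance

def pvWitness_find_resolved_indices : (List (List (String × Bool))) :=
  [[("is_chat_ir", true)], [("is_code_ic", true), ("is_chat_ir", false)]]

def Spec_find_resolved_indices (entries : List (List (String × Bool))) (out : List Int) : Prop := out = find_resolved_indices_alt entries
instance (entries : List (List (String × Bool))) (out : List Int) : Decidable (Spec_find_resolved_indices entries out) := by unfold Spec_find_resolved_indices; infer_instance

-- ===== CLAIM (what is proved, stated in full; the proofs are below) =====
def Claim_equal_find_resolved_indices : Prop := ∀ (entries : List (List (String × Bool))), Dom_find_resolved_indices entries → Pre_find_resolved_indices entries → Spec_find_resolved_indices entries (find_resolved_indices entries)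

-- ===== LEMMAS AND PROOFS =====

theorem mem_code_positions (entries : List (List (String × Bool))) (x : Int) :
    (x ∈ PySem.Set.ofList (((((PySem.List.enumerate entries 0).filter
        (fun ie => ((PySem.Dict.mk ie.2).get? "is_chat_ir").getD false)).map (·.1)).filter (fun i =>
      decide (i + 1 < (entries.length : Int)) &&
      (PySem.List.pyGet? entries (i + 1)).elim false
        (fun nxt => ((PySem.Dict.mk nxt).get? "is_code_ic").getD false))).map (· + 1)))
    ↔ ∃ k : Nat, ∃ _ : k + 1 < entries.length,
        x = (k:Int) + 1 ∧ ((PySem.Dict.mk entries[k]).get? "is_chat_ir").getD false = true ∧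
        ((PySem.Dict.mk entries[k+1]).get? "is_code_ic").getD false = true := by
  rw [PySem.Set.mem_ofList]
  simp only [List.mem_map, List.mem_filter, PySem.List.mem_enumerate_iff, zero_add]
  constructor
  · rintro ⟨i, ⟨⟨a, ⟨⟨m, hm, rfl⟩, hch⟩, rfl⟩, hq⟩, rfl⟩
    dsimp only at hq hch ⊢
    rw [show ((m:Int) + 1) = ((m+1 : Nat) : Int) by push_cast; ring,
        PySem.List.pyGet?_natCast] at hq
    have hm1 : m + 1 < entries.length := by
      rcases Bool.and_eq_true_iff.mp hq with ⟨h1, -⟩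
      have := of_decide_eq_true h1
      exact_mod_cast this
    refine ⟨m, hm1, by ring, hch, ?_⟩
    rcases Bool.and_eq_true_iff.mp hq with ⟨-, h2⟩
    rw [List.getElem?_eq_getElem hm1] at h2
    simpa using h2
  · rintro ⟨k, hk1, rfl, hch, hcc⟩
    refine ⟨(k:Int), ⟨⟨((k:Int), entries[k]), ⟨⟨k, by omega, by simp⟩, hch⟩, rfl⟩, ?_⟩, rfl⟩
    rw [show ((k:Int) + 1) = ((k+1 : Nat) : Int) by push_cast; ring,
        PySem.List.pyGet?_natCast, List.getElem?_eq_getElem hk1]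
    simp only [Option.elim_some, Bool.and_eq_true_iff, decide_eq_true_eq]
    exact ⟨by omega, hcc⟩

theorem find_resolved_indices_equiv (entries : List (List (String × Bool))) :
    find_resolved_indices entries = find_resolved_indices_alt entries := by
  simp only [find_resolved_indices, find_resolved_indices_alt]
  rw [List.foldl_map, ← PySem.List.foldl_if_eq_foldl_filter]
  apply PySem.List.foldl_congr_mem
  intro acc ie hie
  rcases (PySem.List.mem_enumerate_iff _ _ _).mp hie with ⟨k, hk, rfl⟩
  simp only [zero_add]
  cases hchat : ((PySem.Dict.mk entries[k]).get? "is_chat_ir").getD false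
  · simp
  · simp only [Bool.true_and, if_true]
    by_cases hlt : k + 1 < entries.length
    · have hdec : decide (((k:Int) + 1) < (entries.length : Int)) = true := by
        simp only [decide_eq_true_eq]; omega
      rw [hdec, show ((k:Int) + 1) = ((k+1 : Nat) : Int) by push_cast; ring,
          PySem.List.pyGet?_natCast, List.getElem?_eq_getElem hlt]
      rcases hc : ((PySem.Dict.mk entries[k+1]).get? "is_code_ic").getD false with _ | _
      · have hno : PySem.Set.contains (PySem.Set.ofList (((((PySem.List.enumerate entries 0).filter
            (fun ie => ((PySem.Dict.mk ie.2).get? "is_chat_ir").getD false)).map (·.1)).filter (fun i =>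
          decide (i + 1 < (entries.length : Int)) &&
          (PySem.List.pyGet? entries (i + 1)).elim false
            (fun nxt => ((PySem.Dict.mk nxt).get? "is_code_ic").getD false))).map (· + 1)))
            (((k+1 : Nat) : Int)) = false := by
          rw [PySem.Set.contains_eq_decide, decide_eq_false_iff_not, mem_code_positions]
          rintro ⟨m, hm, hx, -, hcc⟩
          have : m = k := by omega
          subst this
          rw [hc] at hcc; exact Bool.false_ne_true hcc
        rw [hno]
        simp [hc]
      · have hyes : PySem.Set.contains (PySem.Set.ofList (((((PySem.List.enumerate entries 0).filter
            (fun ie => ((PySem.Dict.mk ie.2).get? "is_chat_ir").getD false)).map (·.1)).filter (fun i =>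
          decide (i + 1 < (entries.length : Int)) &&
          (PySem.List.pyGet? entries (i + 1)).elim false
            (fun nxt => ((PySem.Dict.mk nxt).get? "is_code_ic").getD false))).map (· + 1)))
            (((k+1 : Nat) : Int)) = true := by
          rw [PySem.Set.contains_eq_decide, decide_eq_true_eq, mem_code_positions]
          exact ⟨k, hlt, by push_cast; ring, hchat, hc⟩
        rw [hyes]
        simp [hc]
    · have hdec : decide (((k:Int) + 1) < (entries.length : Int)) = false := by
        simp only [decide_eq_false_iff_not]; omega
      have hno : PySem.Set.contains (PySem.Set.ofList (((((PySem.List.enumerate entries 0).filter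
          (fun ie => ((PySem.Dict.mk ie.2).get? "is_chat_ir").getD false)).map (·.1)).filter (fun i =>
        decide (i + 1 < (entries.length : Int)) &&
        (PySem.List.pyGet? entries (i + 1)).elim false
          (fun nxt => ((PySem.Dict.mk nxt).get? "is_code_ic").getD false))).map (· + 1)))
          ((k:Int) + 1) = false := by
        rw [PySem.Set.contains_eq_decide, decide_eq_false_iff_not, mem_code_positions]
        rintro ⟨m, hm, hx, -, -⟩
        omega
      rw [hdec, hno]
      simp

-- ===== VERDICT (by name: the statement is the Claim_ definition above) =====
theorem find_resolved_indices_spec : Claim_equal_find_resolved_indices := by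
  intro entries _ _
  exact find_resolved_indices_equiv entries
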